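-- pv_equiv track=rewrite | github.com/ForYouPage-Org/aies_041926_mental_health | analysis/phq4_detection_probe_rq3.py | build_messages_block
-- ===== SOURCE A (Python) =====
-- def build_messages_block(msgs: list[str], max_chars: int) -> str:
--     """Concatenate sampled messages with separators, truncate to max_chars."""
--     out = []
--     used = 0
--     for m in msgs:
--         line = f"- {m.strip()}"
--         if used + len(line) + 2 > max_chars:
--             break
--         out.append(line)
--         used += len(line) + 2
--     return "\n".join(out)
-- ===== SOURCE B (Python) =====
-- def build_messages_block(msgs: list[str], max_chars: int) -> str:
--     """Prefix-sum formulation: map to lines, build running totals, cut at the limit."""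
--     lines = ["- " + m.strip() for m in msgs]
--     totals = []
--     run = 0
--     for line in lines:
--         run += len(line) + 2
--         totals.append(run)
--     # totals is strictly increasing (each line costs >= 2), so the kept prefix
--     # is exactly the totals that fit within max_chars
--     k = sum(1 for t in totals if t <= max_chars)
--     return "\n".join(lines[:k])
-- ===== Notes on version B (the rewrite author's own statement) =====
-- stated objective: alternative
-- what changed: Replaced the counter-with-early-break loop by an eager map to lines, a prefix-sum pass of running totals, a count of totals within max_chars (totals are strictly increasing, so counting equals cutting at the first overflow), and a slice before joining.
import Mathlib
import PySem

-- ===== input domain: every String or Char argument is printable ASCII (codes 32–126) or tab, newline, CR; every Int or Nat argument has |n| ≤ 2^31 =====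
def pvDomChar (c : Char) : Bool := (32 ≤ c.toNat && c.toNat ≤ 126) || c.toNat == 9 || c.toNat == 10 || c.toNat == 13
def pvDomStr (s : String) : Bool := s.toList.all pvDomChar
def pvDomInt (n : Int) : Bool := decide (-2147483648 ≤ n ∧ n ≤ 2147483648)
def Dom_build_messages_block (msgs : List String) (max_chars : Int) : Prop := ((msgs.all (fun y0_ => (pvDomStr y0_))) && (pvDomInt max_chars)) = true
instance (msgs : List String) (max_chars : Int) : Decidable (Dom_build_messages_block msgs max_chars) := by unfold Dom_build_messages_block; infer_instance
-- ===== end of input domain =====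

-- B replaces A's counter-with-break loop by an eager map + prefix-sum + count-and-slice decomposition (alternative, same cost).


-- shared literal expression f"- {m.strip()}" / "- " + m.strip()
def pvLine (m : String) : String := "- " ++ PySem.Str.strip m

-- ===== PORT A =====
def pvALoop (max_chars : Int) : List String → Int → List String → List String
  | [], _, out => out
  | m :: rest, used, out =>
    if used + PySem.Str.len (pvLine m) + 2 > max_chars then out
    else pvALoop max_chars rest (used + PySem.Str.len (pvLine m) + 2) (out ++ [pvLine m])

def build_messages_block (msgs : List String) (max_chars : Int) : String :=
  PySem.Str.join "\n" (pvALoop max_chars msgs 0 [])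

-- ===== PORT B =====
def build_messages_block_alt (msgs : List String) (max_chars : Int) : String :=
  let lines := msgs.map pvLine
  let totals := (lines.foldl
    (fun (acc : List Int × Int) L =>
      (acc.1 ++ [acc.2 + PySem.Str.len L + 2], acc.2 + PySem.Str.len L + 2)) ([], 0)).1
  let k := totals.countP (fun t => decide (t ≤ max_chars))
  -- lines[:k] with k a count (hence 0 ≤ k): List.take
  PySem.Str.join "\n" (lines.take k)

-- ===== PRECONDITION & SPEC =====
def Spec_build_messages_block (msgs : List String) (max_chars : Int) (out : String) : Prop := out = build_messages_block_alt msgs max_chars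
instance (msgs : List String) (max_chars : Int) (out : String) : Decidable (Spec_build_messages_block msgs max_chars out) := by unfold Spec_build_messages_block; infer_instance

-- ===== CLAIM (what is proved, stated in full; the proofs are below) =====
def Claim_equal_build_messages_block : Prop := ∀ (msgs : List String) (max_chars : Int), Dom_build_messages_block msgs max_chars → Spec_build_messages_block msgs max_chars (build_messages_block msgs max_chars)

-- ===== LEMMAS AND PROOFS =====

-- common reference form: recursion on the remaining budget
def pvG : List String → Int → List String
  | [], _ => []
  | m :: rest, b =>
    if PySem.Str.len (pvLine m) + 2 > b then []
    else pvLine m :: pvG rest (b - (PySem.Str.len (pvLine m) + 2))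

-- prefix sums of the line costs starting from r, and the final running total
def pvPfx : List String → Int → List Int
  | [], _ => []
  | m :: rest, r => (r + PySem.Str.len (pvLine m) + 2) :: pvPfx rest (r + PySem.Str.len (pvLine m) + 2)

def pvRun : List String → Int → Int
  | [], r => r
  | m :: rest, r => pvRun rest (r + PySem.Str.len (pvLine m) + 2)

theorem pvLen_nonneg (m : String) : 0 ≤ PySem.Str.len m := by
  simp [PySem.Str.len_eq]

theorem pvALoop_eq (max_chars : Int) :
    ∀ (msgs : List String) (used : Int) (out : List String),
      pvALoop max_chars msgs used out = out ++ pvG msgs (max_chars - used) := by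
  intro msgs
  induction msgs with
  | nil => intro used out; simp [pvALoop, pvG]
  | cons m rest ih =>
    intro used out
    by_cases h : used + PySem.Str.len (pvLine m) + 2 > max_chars
    · rw [pvALoop, if_pos h, pvG, if_pos (by omega)]
      simp
    · have heq : max_chars - (used + PySem.Str.len (pvLine m) + 2)
           = max_chars - used - (PySem.Str.len (pvLine m) + 2) := by omega
      rw [pvALoop, if_neg h, pvG, if_neg (by omega), ih, heq]
      simp [List.append_assoc]

theorem pvFoldl_eq (msgs : List String) :
    ∀ (ts : List Int) (r : Int),
      (msgs.map pvLine).foldl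
        (fun (acc : List Int × Int) L =>
          (acc.1 ++ [acc.2 + PySem.Str.len L + 2], acc.2 + PySem.Str.len L + 2)) (ts, r)
      = (ts ++ pvPfx msgs r, pvRun msgs r) := by
  induction msgs with
  | nil => intro ts r; simp [pvPfx, pvRun]
  | cons m rest ih =>
    intro ts r
    simp only [List.map_cons, List.foldl_cons, ih, pvPfx, pvRun]
    simp

theorem pvCount_zero (max_chars : Int) :
    ∀ (msgs : List String) (r : Int), max_chars < r →
      (pvPfx msgs r).countP (fun t => decide (t ≤ max_chars)) = 0 := by
  intro msgs
  induction msgs with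
  | nil => intro r _; simp [pvPfx]
  | cons m rest ih =>
    intro r h
    have hm := pvLen_nonneg (pvLine m)
    rw [pvPfx, List.countP_cons]
    rw [ih _ (by omega)]
    simp only [decide_eq_true_eq]
    rw [if_neg (by omega)]

theorem pvTake_eq (max_chars : Int) :
    ∀ (msgs : List String) (r : Int),
      (msgs.map pvLine).take ((pvPfx msgs r).countP (fun t => decide (t ≤ max_chars)))
      = pvG msgs (max_chars - r) := by
  intro msgs
  induction msgs with
  | nil => intro r; simp [pvPfx, pvG]
  | cons m rest ih =>
    intro r
    rw [pvPfx, List.countP_cons]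
    simp only [decide_eq_true_eq]
    by_cases h : r + PySem.Str.len (pvLine m) + 2 ≤ max_chars
    · rw [if_pos h, List.map_cons, List.take_succ_cons, ih]
      rw [pvG, if_neg (by omega)]
      have heq : max_chars - r - (PySem.Str.len (pvLine m) + 2)
           = max_chars - (r + PySem.Str.len (pvLine m) + 2) := by omega
      rw [heq]
    · rw [if_neg h]
      rw [pvCount_zero max_chars rest _ (by omega)]
      rw [pvG, if_pos (by omega)]
      simp

-- ===== VERDICT (by name: the statement is the Claim_ definition above) =====
theorem build_messages_block_spec : Claim_equal_build_messages_block := by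
  intro msgs max_chars _
  unfold Spec_build_messages_block build_messages_block build_messages_block_alt
  rw [pvALoop_eq max_chars msgs 0 []]
  simp only [List.nil_append]
  rw [pvFoldl_eq msgs [] 0]
  simp only [List.nil_append]
  rw [pvTake_eq max_chars msgs 0]
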